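-- pv_equiv track=rewrite | github.com/pypi-data/pypi-mirror-398 | packages/ares-reasoning/ares_reasoning-1.0.0.tar.gz/ares_reasoning-1.0.0/ares/generator.py | extract_reasoning
-- ===== SOURCE A (Python) =====
-- def extract_reasoning(response: str) -> str:
--     """Extract just the reasoning (before the answer)."""
--     lines = response.strip().split("\n")
--     reasoning_lines = []
--     for line in lines:
--         if line.upper().startswith("ANSWER:"):
--             break
--         reasoning_lines.append(line)
--     return "\n".join(reasoning_lines)
-- ===== SOURCE B (Python) =====
-- def extract_reasoning(response: str) -> str:
--     """Extract just the reasoning (before the answer)."""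
--     text = response.strip()
--     up = text.upper()
--     if up.startswith("ANSWER:"):
--         return ""
--     k = up.find("\nANSWER:")
--     return text if k == -1 else text[:k]
-- ===== Notes on version B (the rewrite author's own statement) =====
-- stated objective: alternative
-- what changed: B never splits into lines: it uppercases the stripped text once and locates the cut by substring search (a startswith test for a marker on the first line, one find of newline-plus-marker for later lines), returning a single slice of the text instead of A's split/accumulate-until-break/join over a line list.
import Mathlib
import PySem

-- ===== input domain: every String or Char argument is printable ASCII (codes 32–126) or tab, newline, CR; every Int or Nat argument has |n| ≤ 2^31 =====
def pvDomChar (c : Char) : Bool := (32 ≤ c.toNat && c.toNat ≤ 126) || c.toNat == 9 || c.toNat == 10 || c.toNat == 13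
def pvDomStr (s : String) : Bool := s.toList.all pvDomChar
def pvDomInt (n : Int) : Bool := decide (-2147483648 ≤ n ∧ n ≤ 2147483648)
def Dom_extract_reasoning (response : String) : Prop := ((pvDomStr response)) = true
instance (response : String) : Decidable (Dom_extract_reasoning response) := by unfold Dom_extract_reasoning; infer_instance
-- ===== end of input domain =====

-- B locates the cut by substring search on the uppercased text (a startswith test, then one find of newline-plus-marker) and returns a single slice, instead of A's split-into-lines, accumulate-until-break, join; same asymptotic cost, not claimed faster.

-- ===== PORT A =====
-- the literal test `line.upper().startswith("ANSWER:")`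
def isAnswerLine (line : String) : Bool :=
  PySem.Str.startswith (PySem.Str.upper line) "ANSWER:"

-- the for-loop with break, carrying the reasoning_lines accumulator
def eaLoopA : List String → List String → List String
  | [], acc => acc
  | l :: ls, acc =>
    if isAnswerLine l then acc
    else eaLoopA ls (acc ++ [l])

def extract_reasoning (response : String) : String :=
  -- split? is some because the separator "\n" is nonempty (Python never raises here)
  let lines := (PySem.Str.split? (PySem.Str.strip response) "\n").getD []
  PySem.Str.join "\n" (eaLoopA lines [])

-- ===== PORT B =====
def extract_reasoning_alt (response : String) : String :=
  let text := PySem.Str.strip response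
  let up := PySem.Str.upper text
  if PySem.Str.startswith up "ANSWER:" then ""
  else
    let k := PySem.Str.find up "\nANSWER:"
    if k == -1 then text else PySem.Str.slice text none (some k)

-- ===== PRECONDITION & SPEC =====
def Spec_extract_reasoning (response : String) (out : String) : Prop := out = extract_reasoning_alt response
instance (response : String) (out : String) : Decidable (Spec_extract_reasoning response out) := by unfold Spec_extract_reasoning; infer_instance

-- ===== CLAIM (what is proved, stated in full; the proofs are below) =====
def Claim_equal_extract_reasoning : Prop := ∀ (response : String), Dom_extract_reasoning response → Spec_extract_reasoning response (extract_reasoning response)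

-- ===== LEMMAS AND PROOFS =====

def mySplit : List Char → List (List Char)
  | [] => [[]]
  | c :: rest => if c = '\n' then [] :: mySplit rest else (mySplit rest).modifyHead (c :: ·)

theorem goChar (fuel : Nat) : ∀ (l cur : List Char) (acc : List (List Char)),
    l.length < fuel →
    PySem.Chars.splitOn.go ['\n'] fuel l cur acc
      = acc.reverse ++ (mySplit l).modifyHead (cur.reverse ++ ·) := by
  induction fuel with
  | zero => intro l cur acc h; omega
  | succ n ih =>
    intro l cur acc h
    cases l with
    | nil => simp [PySem.Chars.splitOn.go, mySplit]
    | cons c rest =>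
      by_cases hc : c = '\n'
      · subst hc
        rw [PySem.Chars.splitOn.go]
        simp only [List.isPrefixOf, Bool.and_true, beq_self_eq_true, if_pos]
        show PySem.Chars.splitOn.go ['\n'] n rest [] (cur.reverse :: acc) = _
        rw [ih rest [] _ (by simpa using Nat.lt_of_succ_lt_succ h)]
        simp [mySplit]
        exact congrFun List.modifyHead_id _
      · rw [PySem.Chars.splitOn.go]
        have hpre : List.isPrefixOf ['\n'] (c :: rest) = false := by
          simp [List.isPrefixOf]
          exact fun hh => absurd hh.symm hc
        rw [hpre]
        simp only [Bool.false_eq_true, if_false]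
        rw [ih rest (c :: cur) acc (by simpa using Nat.lt_of_succ_lt_succ h)]
        rw [show mySplit (c :: rest) = (mySplit rest).modifyHead (c :: ·) by simp [mySplit, hc],
           List.modifyHead_modifyHead]
        have e : (fun x => (c :: cur).reverse ++ x) = ((fun x => cur.reverse ++ x) ∘ fun x => c :: x) := by
          funext x; simp
        rw [e]

theorem splitOn_eq_mySplit (l : List Char) :
    PySem.Chars.splitOn l ['\n'] = mySplit l := by
  rw [PySem.Chars.splitOn, goChar (l.length + 1) l [] [] (by omega)]
  simp
  exact congrFun List.modifyHead_id _

theorem mySplit_no_nl {l : List Char} (h : '\n' ∉ l) : mySplit l = [l] := by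
  induction l with
  | nil => rfl
  | cons c rest ih =>
    have hc : c ≠ '\n' := fun hh => h (hh ▸ List.mem_cons_self)
    rw [show mySplit (c :: rest) = (mySplit rest).modifyHead (c :: ·) by simp [mySplit, hc]]
    rw [ih (fun hh => h (List.mem_cons_of_mem _ hh))]
    rfl

theorem mySplit_append {l : List Char} (r : List Char) (h : '\n' ∉ l) :
    mySplit (l ++ '\n' :: r) = l :: mySplit r := by
  induction l with
  | nil => simp [mySplit]
  | cons c rest ih =>
    have hc : c ≠ '\n' := fun hh => h (hh ▸ List.mem_cons_self)
    rw [List.cons_append,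
      show mySplit (c :: (rest ++ '\n' :: r)) = (mySplit (rest ++ '\n' :: r)).modifyHead (c :: ·) by
        simp [mySplit, hc]]
    rw [ih (fun hh => h (List.mem_cons_of_mem _ hh))]
    rfl

theorem upperChar_nl_iff (c : Char) : PySem.Chars.upperChar c = '\n' ↔ c = '\n' := by
  constructor
  · intro h
    unfold PySem.Chars.upperChar at h
    split at h
    · rename_i hl
      simp [PySem.Chars.islower] at hl
      exfalso
      have h1 : ('a' : Char) ≤ c := hl.1
      have h2 : c ≤ 'z' := hl.2
      have : (Char.ofNat (c.toNat - 32)).toNat = ('\n' : Char).toNat := by rw [h]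
      have hb : 97 ≤ c.toNat := h1
      have hb2 : c.toNat ≤ 122 := h2
      have hv : (Char.ofNat (c.toNat - 32)).toNat = c.toNat - 32 := by
        rw [Char.toNat_ofNat, if_pos]
        unfold Nat.isValidChar
        left; omega
      have hn : ('\n' : Char).toNat = 10 := rfl
      rw [hv, hn] at this
      omega
    · exact h
  · intro h; subst h; rfl

theorem nl_mem_upper_iff (l : List Char) : '\n' ∈ PySem.Chars.upper l ↔ '\n' ∈ l := by
  unfold PySem.Chars.upper
  rw [List.mem_map]
  constructor
  · rintro ⟨c, hc, he⟩
    exact ((upperChar_nl_iff c).mp he) ▸ hc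
  · intro h
    exact ⟨'\n', h, rfl⟩

theorem prefix_split {a b q : List Char} (hq : '\n' ∉ q)
    (hb : b = [] ∨ ∃ r, b = '\n' :: r) : (q <+: a ++ b) ↔ q <+: a := by
  constructor
  · intro h
    rcases hb with rfl | ⟨r, rfl⟩
    · simpa using h
    · by_cases hlen : q.length ≤ a.length
      · have he : q = List.take q.length (a ++ '\n' :: r) := List.prefix_iff_eq_take.mp h
        rw [List.take_append_of_le_length hlen] at he
        exact he ▸ List.take_prefix _ _
      · exfalso
        have hql : a.length < q.length := by omega
        have hg : q[a.length] = (a ++ '\n' :: r)[a.length]'(by simp) := h.getElem hql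
        have hnl : (a ++ '\n' :: r)[a.length]'(by simp) = '\n' := by
          rw [List.getElem_append_right (Nat.le_refl _)]
          simp
        exact hq (hnl ▸ hg ▸ List.getElem_mem hql)
  · intro h
    exact h.trans (List.prefix_append a b)

theorem find_eq_of {s sub : List Char} (n : Nat) (h1 : sub <+: List.drop n s)
    (h2 : ∀ i < n, ¬ sub <+: List.drop i s) : PySem.Chars.find s sub = n := by
  have hinf : sub <:+: s := List.IsInfix.trans h1.isInfix (List.drop_suffix n s).isInfix
  have hge : 0 ≤ PySem.Chars.find s sub := (PySem.Chars.find_nonneg_iff s sub).mpr hinf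
  obtain ⟨hm, hmin⟩ := PySem.Chars.find_spec hge
  set m := (PySem.Chars.find s sub).toNat with hmdef
  have : m = n := by
    rcases lt_trichotomy m n with hlt | heq | hgt
    · exact absurd hm (h2 m hlt)
    · exact heq
    · exact absurd h1 (hmin n hgt)
  omega

def pvPat : List Char := "ANSWER:".toList
def pChar (l : List Char) : Bool := PySem.Chars.startswith (PySem.Chars.upper l) pvPat

theorem nl_not_mem_pat : '\n' ∉ pvPat := by decide

theorem nl_not_mem_takeWhile (t : List Char) : '\n' ∉ t.takeWhile (fun c => c ≠ '\n') := by
  intro h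
  have := List.mem_takeWhile_imp h
  simp at this

theorem decomp (t : List Char) (h : '\n' ∈ t) :
    ∃ a r, t = a ++ '\n' :: r ∧ '\n' ∉ a := by
  refine ⟨t.takeWhile (fun c => c ≠ '\n'), (t.dropWhile (fun c => c ≠ '\n')).tail, ?_, nl_not_mem_takeWhile t⟩
  have hne : t.dropWhile (fun c => c ≠ '\n') ≠ [] := by
    intro hnil
    have : t.takeWhile (fun c => c ≠ '\n') = t := by
      have := List.takeWhile_append_dropWhile (p := fun c => c ≠ '\n') (l := t)
      rw [hnil, List.append_nil] at this; exact this
    rw [← this] at h; exact nl_not_mem_takeWhile t h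
  have hhead : ¬ ((t.dropWhile (fun c => c ≠ '\n')).head hne ≠ '\n') := by
    simpa using List.head_dropWhile_not (p := fun c => c ≠ '\n') hne
  have hh : (t.dropWhile (fun c => c ≠ '\n')).head hne = '\n' := by
    by_contra hc; exact hhead (by simpa using hc)
  conv_lhs => rw [← List.takeWhile_append_dropWhile (p := fun c => c ≠ '\n') (l := t)]
  rw [← List.cons_head_tail hne, hh]
  simp

-- upper distributes over the line decomposition
theorem upper_decomp (a r : List Char) :
    PySem.Chars.upper (a ++ '\n' :: r) = PySem.Chars.upper a ++ '\n' :: PySem.Chars.upper r := by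
  simp [PySem.Chars.upper, List.map_append]
  rfl

theorem no_match_low {a : List Char} (b : List Char) (ha : '\n' ∉ a) {i : Nat}
    (hi : i < a.length) : ¬ ('\n' :: pvPat) <+: List.drop i (a ++ b) := by
  intro h
  have hlen : 0 < (List.drop i (a ++ b)).length := by
    simp [List.length_drop]
    omega
  have h0 : ('\n' :: pvPat)[0] = (List.drop i (a ++ b))[0]'(hlen) := h.getElem (by simp)
  simp only [List.getElem_drop, Nat.add_zero] at h0
  rw [List.getElem_append_left hi] at h0
  have : a[i] = '\n' := h0.symm
  exact ha (this ▸ List.getElem_mem hi)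

theorem drop_above (A B : List Char) (j : Nat) :
    List.drop (A.length + 1 + j) (A ++ '\n' :: B) = List.drop j B := by
  rw [show A.length + 1 + j = A.length + (1 + j) by omega, List.drop_append]
  simp [Nat.add_comm 1 j]

theorem take_above (A B : List Char) (m : Nat) :
    List.take (A.length + 1 + m) (A ++ '\n' :: B) = A ++ '\n' :: List.take m B := by
  rw [show A.length + 1 + m = A.length + (1 + m) by omega, List.take_append]
  simp [Nat.add_comm 1 m]

theorem infix_exists {sub s : List Char} (h : sub <:+: s) : ∃ i, sub <+: List.drop i s := by
  obtain ⟨p, q, hpq⟩ := h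
  exact ⟨p.length, by rw [← hpq, List.append_assoc, List.drop_left]; exact ⟨q, rfl⟩⟩

-- the startswith test on a whole string equals the test on its first line
theorem startswith_decomp (a r : List Char) :
    PySem.Chars.startswith (PySem.Chars.upper (a ++ '\n' :: r)) pvPat = pChar a := by
  rw [upper_decomp]
  rw [Bool.eq_iff_iff]
  unfold pChar
  rw [PySem.Chars.startswith_iff, PySem.Chars.startswith_iff]
  exact prefix_split nl_not_mem_pat (Or.inr ⟨PySem.Chars.upper r, rfl⟩)

theorem mySplit_ne_nil (l : List Char) : mySplit l ≠ [] := by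
  induction l with
  | nil => simp [mySplit]
  | cons c rest ih =>
    by_cases h : c = '\n'
    · simp [mySplit, h]
    · simp only [mySplit, if_neg h]
      cases hm : mySplit rest with
      | nil => exact absurd hm ih
      | cons a as => simp

theorem head_line {r : List Char} {x : List Char} {xs : List (List Char)}
    (hx : mySplit r = x :: xs) :
    pChar x = PySem.Chars.startswith (PySem.Chars.upper r) pvPat := by
  by_cases h : '\n' ∈ r
  · obtain ⟨a, r', rfl, ha⟩ := decomp r h
    rw [startswith_decomp a r']
    rw [mySplit_append r' ha] at hx
    rw [(List.cons_eq_cons.mp hx).1]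
  · rw [mySplit_no_nl h] at hx
    rw [(List.cons_eq_cons.mp hx).1]
    rfl

def aCore (t : List Char) : List Char :=
  PySem.Chars.join ['\n'] (List.take (List.findIdx pChar (mySplit t)) (mySplit t))

def bCore (t : List Char) : List Char :=
  if PySem.Chars.startswith (PySem.Chars.upper t) pvPat then []
  else
    let k := PySem.Chars.find (PySem.Chars.upper t) ('\n' :: pvPat)
    if k = -1 then t else List.take k.toNat t

theorem core_nonl {t : List Char} (h : '\n' ∉ t) : aCore t = bCore t := by
  have hup : '\n' ∉ PySem.Chars.upper t := by rw [nl_mem_upper_iff]; exact h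
  by_cases hp : pChar t = true
  · unfold aCore bCore
    rw [mySplit_no_nl h, List.findIdx_cons, hp]
    have hsw : PySem.Chars.startswith (PySem.Chars.upper t) pvPat = true := hp
    simp [hsw, PySem.Chars.join_nil]
  · unfold aCore bCore
    rw [mySplit_no_nl h, List.findIdx_cons]
    rw [Bool.not_eq_true] at hp
    have hp' : PySem.Chars.startswith (PySem.Chars.upper t) pvPat = false := hp
    have hfind : PySem.Chars.find (PySem.Chars.upper t) ('\n' :: pvPat) = -1 := by
      rw [PySem.Chars.find_eq_neg_one_iff]
      intro hinf
      exact hup (hinf.subset List.mem_cons_self)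
    simp [hp, hp', hfind, PySem.Chars.join_singleton]

theorem core_aux : ∀ (n : Nat) (t : List Char), t.length ≤ n → aCore t = bCore t := by
  intro n
  induction n with
  | zero =>
    intro t ht
    have : t = [] := List.eq_nil_of_length_eq_zero (Nat.le_zero.mp ht)
    subst this
    exact core_nonl (by simp)
  | succ n ih =>
    intro t ht
    by_cases hmem : '\n' ∈ t
    · obtain ⟨a, r, rfl, ha⟩ := decomp t hmem
      have hr : r.length ≤ n := by simp at ht; omega
      have IH := ih r hr
      have hA : '\n' ∉ PySem.Chars.upper a := by rw [nl_mem_upper_iff]; exact ha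
      have hAlen : (PySem.Chars.upper a).length = a.length := List.length_map ..
      have hsw := startswith_decomp a r
      by_cases hpa : pChar a = true
      · unfold aCore bCore
        rw [mySplit_append r ha, List.findIdx_cons, hpa]
        rw [hpa] at hsw
        simp [hsw, PySem.Chars.join_nil]
      · rw [Bool.not_eq_true] at hpa
        rw [hpa] at hsw
        obtain ⟨y, ys, hms⟩ : ∃ y ys, mySplit r = y :: ys := by
          cases hm : mySplit r with
          | nil => exact absurd hm (mySplit_ne_nil r)
          | cons y ys => exact ⟨y, ys, rfl⟩
        have hhead := head_line hms
        -- A side shape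
        have hAshape : aCore (a ++ '\n' :: r) =
            PySem.Chars.join ['\n'] (a :: List.take (List.findIdx pChar (mySplit r)) (mySplit r)) := by
          unfold aCore
          rw [mySplit_append r ha, List.findIdx_cons, hpa]
          simp
        by_cases hpr : PySem.Chars.startswith (PySem.Chars.upper r) pvPat = true
        · -- first line of r matches: A yields a, B finds the separator at position a.length
          have hj : List.findIdx pChar (mySplit r) = 0 := by
            rw [hms, List.findIdx_cons, hhead.trans hpr]
            rfl
          have hfind : PySem.Chars.find (PySem.Chars.upper (a ++ '\n' :: r)) ('\n' :: pvPat)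
              = (a.length : Int) := by
            rw [upper_decomp]
            apply find_eq_of a.length
            · rw [← hAlen, List.drop_left]
              exact List.cons_prefix_cons.mpr ⟨rfl, (PySem.Chars.startswith_iff ..).mp hpr⟩
            · intro i hi
              exact no_match_low _ hA (hAlen ▸ hi)
          unfold bCore
          rw [hsw, hfind]
          have hne : ((a.length : Int) = -1) = False := by simp
          rw [hAshape, hj]
          simp only [List.take_zero, PySem.Chars.join_singleton, hne, if_false, Bool.false_eq_true,
            Int.toNat_natCast]
          rw [List.take_left' rfl]
        · rw [Bool.not_eq_true] at hpr
          have hpr' : ¬ pvPat <+: PySem.Chars.upper r := by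
            rw [← PySem.Chars.startswith_iff, hpr]; simp
          have hj : List.findIdx pChar (mySplit r) ≠ 0 := by
            rw [hms, List.findIdx_cons, hhead.trans hpr]
            simp
          have hAstep : aCore (a ++ '\n' :: r) = a ++ '\n' :: aCore r := by
            rw [hAshape]
            unfold aCore
            rw [hms]
            rw [hms] at hj
            obtain ⟨j, hjj⟩ : ∃ j, List.findIdx pChar (y :: ys) = j + 1 := by
              cases hjx : List.findIdx pChar (y :: ys) with
              | zero => exact absurd hjx hj
              | succ j => exact ⟨j, rfl⟩
            rw [hjj, List.take_succ_cons, PySem.Chars.join_cons_cons]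
            simp
          unfold bCore
          rw [hsw, upper_decomp]
          unfold bCore at IH
          rw [hpr] at IH
          simp only [Bool.false_eq_true, if_false] at IH ⊢
          by_cases hk : PySem.Chars.find (PySem.Chars.upper r) ('\n' :: pvPat) = -1
          · have hfind : PySem.Chars.find (PySem.Chars.upper a ++ '\n' :: PySem.Chars.upper r)
                ('\n' :: pvPat) = -1 := by
              rw [PySem.Chars.find_eq_neg_one_iff]
              intro hinf
              obtain ⟨i, hpref⟩ := infix_exists hinf
              rcases lt_trichotomy i (PySem.Chars.upper a).length with hlt | heq | hgt
              · exact no_match_low _ hA hlt hpref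
              · subst heq
                rw [List.drop_left] at hpref
                exact hpr' (List.cons_prefix_cons.mp hpref).2
              · have hdec : i = (PySem.Chars.upper a).length + 1 + (i - (PySem.Chars.upper a).length - 1) := by omega
                rw [hdec, drop_above] at hpref
                exact (PySem.Chars.find_ne_neg_one_iff _ _).mpr
                  (hpref.isInfix.trans (List.drop_suffix _ _).isInfix) hk
            rw [hfind, if_pos rfl, hAstep, IH, if_pos hk]
          · have hk0 : 0 ≤ PySem.Chars.find (PySem.Chars.upper r) ('\n' :: pvPat) := by
              have := PySem.Chars.neg_one_le_find (PySem.Chars.upper r) ('\n' :: pvPat)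
              omega
            obtain ⟨hmatch, hmin⟩ := PySem.Chars.find_spec hk0
            set k := (PySem.Chars.find (PySem.Chars.upper r) ('\n' :: pvPat)).toNat with hkdef
            have hfind : PySem.Chars.find (PySem.Chars.upper a ++ '\n' :: PySem.Chars.upper r)
                ('\n' :: pvPat) = ((a.length + 1 + k : Nat) : Int) := by
              apply find_eq_of
              · rw [← hAlen, drop_above]
                exact hmatch
              · intro i hi
                rcases lt_trichotomy i (PySem.Chars.upper a).length with hlt | heq | hgt
                · exact no_match_low _ hA hlt
                · subst heq
                  rw [List.drop_left]
                  intro hpref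
                  exact hpr' (List.cons_prefix_cons.mp hpref).2
                · have hdec : i = (PySem.Chars.upper a).length + 1 + (i - (PySem.Chars.upper a).length - 1) := by omega
                  rw [hdec, drop_above]
                  apply hmin
                  rw [hAlen] at hgt
                  omega
            rw [hfind, if_neg (by omega : ¬ (((a.length + 1 + k : Nat) : Int) = -1))]
            simp only [Int.toNat_natCast]
            rw [take_above, hAstep, IH, if_neg hk]
    · exact core_nonl hmem


theorem eaLoopA_eq_take_findIdx (lines acc : List String) :
    eaLoopA lines acc = acc ++ List.take (List.findIdx isAnswerLine lines) lines := by
  induction lines generalizing acc with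
  | nil => simp [eaLoopA]
  | cons l ls ih =>
    cases h : isAnswerLine l
    · simp [eaLoopA, h, List.findIdx_cons, ih]
    · simp [eaLoopA, h, List.findIdx_cons]

theorem isAnswerLine_ofList (l : List Char) : isAnswerLine (String.ofList l) = pChar l := by
  simp [isAnswerLine, pChar, PySem.Str.startswith, PySem.Str.upper, String.toList_ofList]
  rfl

theorem final (response : String) : extract_reasoning response = extract_reasoning_alt response := by
  apply String.toList_inj.mp
  have ht : (PySem.Str.strip response).toList = PySem.Chars.strip response.toList :=
    PySem.Str.toList_strip response
  have hup : (PySem.Str.upper (PySem.Str.strip response)).toList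
      = PySem.Chars.upper (PySem.Chars.strip response.toList) := by
    rw [PySem.Str.toList_upper, ht]
  have hsw : PySem.Str.startswith (PySem.Str.upper (PySem.Str.strip response)) "ANSWER:"
      = PySem.Chars.startswith (PySem.Chars.upper (PySem.Chars.strip response.toList)) pvPat := by
    rw [PySem.Str.startswith, hup]; rfl
  have hfind : PySem.Str.find (PySem.Str.upper (PySem.Str.strip response)) "\nANSWER:"
      = PySem.Chars.find (PySem.Chars.upper (PySem.Chars.strip response.toList)) ('\n' :: pvPat) := by
    rw [PySem.Str.find, hup]; rfl
  have hA : (extract_reasoning response).toList = aCore (PySem.Chars.strip response.toList) := by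
    show (PySem.Str.join "\n"
      (eaLoopA ((PySem.Str.split? (PySem.Str.strip response) "\n").getD []) [])).toList
      = aCore (PySem.Chars.strip response.toList)
    have hsplit : (PySem.Str.split? (PySem.Str.strip response) "\n").getD []
        = (mySplit (PySem.Chars.strip response.toList)).map String.ofList := by
      rw [PySem.Str.split?]
      rw [show ("\n".toList) = ['\n'] from rfl, ht]
      rw [PySem.Chars.split?]
      rw [if_neg (by simp)]
      rw [Option.map_some, Option.getD_some, splitOn_eq_mySplit]
    rw [hsplit, eaLoopA_eq_take_findIdx, List.nil_append, PySem.Str.toList_join]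
    rw [List.findIdx_map]
    have hcomp : (isAnswerLine ∘ String.ofList) = pChar := by
      funext l; exact isAnswerLine_ofList l
    rw [hcomp, ← List.map_take, List.map_map]
    rw [show (String.toList ∘ String.ofList) = (id : List Char → List Char) from
      funext (fun l => String.toList_ofList), List.map_id]
    rw [show ("\n".toList) = ['\n'] from rfl]
    rfl
  have hB : (extract_reasoning_alt response).toList = bCore (PySem.Chars.strip response.toList) := by
    show (if PySem.Str.startswith (PySem.Str.upper (PySem.Str.strip response)) "ANSWER:" then ""
        else if PySem.Str.find (PySem.Str.upper (PySem.Str.strip response)) "\nANSWER:" == -1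
          then PySem.Str.strip response
          else PySem.Str.slice (PySem.Str.strip response) none
            (some (PySem.Str.find (PySem.Str.upper (PySem.Str.strip response)) "\nANSWER:"))).toList
      = bCore (PySem.Chars.strip response.toList)
    rw [hsw, hfind]
    unfold bCore
    cases hc : PySem.Chars.startswith (PySem.Chars.upper (PySem.Chars.strip response.toList)) pvPat with
    | true => rfl
    | false =>
      simp only [Bool.false_eq_true, if_false]
      by_cases hk : PySem.Chars.find (PySem.Chars.upper (PySem.Chars.strip response.toList))
          ('\n' :: pvPat) = -1
      · rw [if_pos (by simpa using hk), if_pos hk]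
        exact ht
      · have hk0 : 0 ≤ PySem.Chars.find (PySem.Chars.upper (PySem.Chars.strip response.toList))
            ('\n' :: pvPat) := by
          have := PySem.Chars.neg_one_le_find
            (PySem.Chars.upper (PySem.Chars.strip response.toList)) ('\n' :: pvPat)
          omega
        rw [if_neg (by simpa using hk), if_neg hk]
        rw [PySem.Str.slice, String.toList_ofList, ht]
        rw [PySem.Chars.slice_eq_listSlice, PySem.List.slice_to (hb := hk0)]
  rw [hA, hB, core_aux _ _ (le_refl _)]

-- ===== VERDICT (by name: the statement is the Claim_ definition above) =====
theorem extract_reasoning_spec : Claim_equal_extract_reasoning := by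
  intro response _
  unfold Spec_extract_reasoning
  exact final response
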